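-- pv_equiv track=rewrite | github.com/hughman98/591_Final_Project | language_features.py | get_math_symbol_count
-- ===== SOURCE A (Python) =====
-- def get_math_symbol_count(input_data):
--     questions = input_data['Question']
--     symbols = ['+', '-', '*', '/', '=', '>', '<', '^', '%']
--     math_symbol_count = []
--     for question in questions:
--         count = 0
--         for character in question:
--             if character in symbols:
--                 count += 1
--         math_symbol_count.append(count)
--     return math_symbol_count
-- ===== SOURCE B (Python) =====
-- def get_math_symbol_count(input_data):
--     return [sum(question.count(sym) for sym in '+-*/=><^%')
--             for question in input_data['Question']]
-- ===== Notes on version B (the rewrite author's own statement) =====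
-- stated objective: idiomatic
-- what changed: Replaces the per-character loop with list membership testing by a comprehension summing str.count of each of the 9 symbols over the question, changing the traversal from one pass per character over the string to one scan per symbol.
import Mathlib
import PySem

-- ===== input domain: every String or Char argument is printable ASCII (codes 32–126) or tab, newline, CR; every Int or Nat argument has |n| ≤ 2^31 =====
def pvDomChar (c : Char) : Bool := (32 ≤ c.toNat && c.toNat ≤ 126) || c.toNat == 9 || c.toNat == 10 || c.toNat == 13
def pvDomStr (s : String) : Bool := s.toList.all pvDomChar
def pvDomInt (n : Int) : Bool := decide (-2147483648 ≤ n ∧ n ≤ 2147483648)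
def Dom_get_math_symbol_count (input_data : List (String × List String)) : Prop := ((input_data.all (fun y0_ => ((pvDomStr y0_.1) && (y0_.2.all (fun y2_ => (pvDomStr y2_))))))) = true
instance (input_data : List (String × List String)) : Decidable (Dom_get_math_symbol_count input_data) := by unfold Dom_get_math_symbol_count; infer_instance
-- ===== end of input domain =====

-- B replaces A's per-character membership loop by summing str.count over the fixed
-- 9-symbol string (idiomatic comprehension); same return value wherever A returns.

-- dict lookup input_data['Question'] (first match; none = KeyError, excluded by Pre_)
def pvQuestions : List (String × List String) → Option (List String)
  | [] => none
  | (k, v) :: rest => if k = "Question" then some v else pvQuestions rest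

-- ===== PORT A =====
def get_math_symbol_count (input_data : List (String × List String)) : List Int :=
  match pvQuestions input_data with
  | none => []   -- Python raises KeyError here; excluded by Pre_
  | some questions =>
    let symbols : List Char := ['+', '-', '*', '/', '=', '>', '<', '^', '%']
    questions.foldl (fun acc question =>
      acc ++ [question.toList.foldl
        (fun count character => if character ∈ symbols then count + 1 else count) (0 : Int)]) []

-- ===== PORT B =====
def get_math_symbol_count_alt (input_data : List (String × List String)) : List Int :=
  match pvQuestions input_data with
  | none => []   -- Python raises KeyError here; excluded by Pre_
  | some questions =>
    questions.map (fun question =>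
      (("+-*/=><^%".toList).map
        (fun sym => (PySem.Chars.count question.toList [sym] : Int))).sum)

-- ===== PRECONDITION & SPEC =====
-- Pre_ excludes exactly the inputs without a "Question" key, on which Python A raises KeyError.
def Pre_get_math_symbol_count (input_data : List (String × List String)) : Prop :=
  "Question" ∈ input_data.map (·.1)
instance (input_data : List (String × List String)) : Decidable (Pre_get_math_symbol_count input_data) := by unfold Pre_get_math_symbol_count; infer_instance

def pvWitness_get_math_symbol_count : (List (String × List String)) :=
  [("Question", ["1+1=2", "hello"])]

def Spec_get_math_symbol_count (input_data : List (String × List String)) (out : List Int) : Prop := out = get_math_symbol_count_alt input_data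
instance (input_data : List (String × List String)) (out : List Int) : Decidable (Spec_get_math_symbol_count input_data out) := by unfold Spec_get_math_symbol_count; infer_instance

-- ===== CLAIM (what is proved, stated in full; the proofs are below) =====
def Claim_equal_get_math_symbol_count : Prop := ∀ (input_data : List (String × List String)), Dom_get_math_symbol_count input_data → Pre_get_math_symbol_count input_data → Spec_get_math_symbol_count input_data (get_math_symbol_count input_data)

-- ===== LEMMAS AND PROOFS =====

-- count.go on a single-character needle counts occurrences of that character
theorem pv_go_single (c : Char) : ∀ (l : List Char) (fuel acc : Nat), l.length ≤ fuel →
    PySem.Chars.count.go [c] fuel l acc = acc + l.count c := by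
  intro l
  induction l with
  | nil => intro fuel acc _; cases fuel <;> simp [PySem.Chars.count.go]
  | cons h t ih =>
    intro fuel acc hf
    cases fuel with
    | zero => simp at hf
    | succ f =>
      rw [PySem.Chars.count.go]
      by_cases hc : h = c
      · subst hc
        simp [List.isPrefixOf, ih _ _ (by simpa using hf)]
        omega
      · have hp : ([c].isPrefixOf (h :: t)) = false := by
          simp [List.isPrefixOf]
          exact fun h' => absurd h'.symm hc
        simp only [hp, Bool.false_eq_true, if_false]
        rw [ih _ _ (by simpa using hf)]
        simp [hc]

theorem pv_count_single (l : List Char) (c : Char) :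
    PySem.Chars.count l [c] = l.count c := by
  simp [PySem.Chars.count, pv_go_single c l l.length 0 le_rfl]

theorem pv_countP_cons_mem (s : Char) (rest : List Char) (hs : s ∉ rest) (q : List Char) :
    q.countP (fun x => decide (x ∈ s :: rest)) = q.count s + q.countP (fun x => decide (x ∈ rest)) := by
  induction q with
  | nil => simp
  | cons a q ih =>
    rw [List.countP_cons, List.countP_cons, List.count_cons, ih]
    by_cases ha : a = s
    · subst ha; simp [hs]; omega
    · by_cases hm : a ∈ rest <;> simp [hm, ha] <;> try omega

theorem pv_countP_mem_eq_sum (syms : List Char) (h : syms.Nodup) (q : List Char) :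
    ((q.countP (fun x => decide (x ∈ syms)) : Nat) : Int)
      = (syms.map (fun s => (q.count s : Int))).sum := by
  induction syms with
  | nil => simp
  | cons s rest ih =>
    rcases List.nodup_cons.mp h with ⟨hs, hr⟩
    rw [pv_countP_cons_mem s rest hs q]
    push_cast
    rw [ih hr]
    simp

-- the per-question values agree
theorem pv_question_eq (q : List Char) :
    q.foldl (fun count character =>
        if character ∈ (['+', '-', '*', '/', '=', '>', '<', '^', '%'] : List Char)
        then count + 1 else count) (0 : Int)
      = (("+-*/=><^%".toList).map (fun sym => (PySem.Chars.count q [sym] : Int))).sum := by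
  rw [PySem.List.foldl_ite_add_one]
  have hlist : "+-*/=><^%".toList = ['+', '-', '*', '/', '=', '>', '<', '^', '%'] := by decide
  rw [hlist]
  simp only [pv_count_single]
  rw [← pv_countP_mem_eq_sum _ (by decide) q]
  simp

-- ===== VERDICT (by name: the statement is the Claim_ definition above) =====
theorem get_math_symbol_count_spec : Claim_equal_get_math_symbol_count := by
  intro input_data _ _
  unfold Spec_get_math_symbol_count get_math_symbol_count get_math_symbol_count_alt
  cases pvQuestions input_data with
  | none => rfl
  | some questions =>
    simp only [PySem.List.foldl_append_singleton_eq_map]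
    exact List.map_congr_left (fun q _ => pv_question_eq q.toList)
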